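-- pv_equiv track=rewrite | github.com/jcolinpatrick/kryptos | scripts/substitution/e_differential_feistel.py | pb_deinterleave
-- ===== SOURCE A (Python) =====
-- def pb_deinterleave(x):
--     """Inverse of interleave."""
--     half = (len(x) + 1) // 2
--     result = [0] * len(x)
--     for i in range(half):
--         result[2*i] = x[i]
--     for i in range(len(x) - half):
--         result[2*i+1] = x[half + i]
--     return result
-- ===== SOURCE B (Python) =====
-- def pb_deinterleave(x):
--     """Inverse of interleave: split once, then interleave in a single pass."""
--     half = (len(x) + 1) // 2
--     first = x[:half]
--     second = x[half:]
--     result = []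
--     for i, e in enumerate(first):
--         result.append(e)
--         if i < len(second):
--             result.append(second[i])
--     return result
-- ===== Notes on version B (the rewrite author's own statement) =====
-- stated objective: simpler
-- what changed: B splits the list once into its two halves and interleaves them in a single alternating-append pass, instead of A's two index-driven fill loops writing into a zero-preallocated list.
import Mathlib
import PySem

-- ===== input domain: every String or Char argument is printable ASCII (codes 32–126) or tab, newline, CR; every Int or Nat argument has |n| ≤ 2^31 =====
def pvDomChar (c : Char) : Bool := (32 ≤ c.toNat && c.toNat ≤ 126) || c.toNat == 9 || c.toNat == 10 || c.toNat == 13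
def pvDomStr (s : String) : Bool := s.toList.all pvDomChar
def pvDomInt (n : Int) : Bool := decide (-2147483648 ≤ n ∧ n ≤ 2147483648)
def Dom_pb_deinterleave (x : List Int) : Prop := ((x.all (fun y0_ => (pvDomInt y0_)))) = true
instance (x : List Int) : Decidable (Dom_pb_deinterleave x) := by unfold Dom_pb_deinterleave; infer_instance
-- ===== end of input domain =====

-- B splits the list once and interleaves the halves in one alternating pass instead of
-- A's two index-driven fill loops into a preallocated list; same O(n) cost, simpler shape.

-- ===== PORT A =====
-- literal port of A: result = [0]*len(x); result[2*i] = x[i] for i in range(half);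
-- result[2*i+1] = x[half+i] for i in range(len(x)-half).  The loop indices are always
-- in range, so x.getD i 0 / List.set are exact for Python's x[i] / result[k] = v.
def pb_deinterleave (x : List Int) : List Int :=
  let half := (x.length + 1) / 2
  let result := List.replicate x.length (0 : Int)
  let result := (List.range half).foldl (fun r i => r.set (2 * i) (x.getD i 0)) result
  let result := (List.range (x.length - half)).foldl
      (fun r i => r.set (2 * i + 1) (x.getD (half + i) 0)) result
  result

-- ===== PORT B =====
-- one alternating-append pass over `first`, taking the matching element of `second` when it exists
def pvInterleave : List Int → List Int → List Int
  | [], _ => []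
  | a :: as, [] => a :: pvInterleave as []
  | a :: as, b :: bs => a :: b :: pvInterleave as bs

def pb_deinterleave_alt (x : List Int) : List Int :=
  let half := (x.length + 1) / 2
  pvInterleave (x.take half) (x.drop half)

-- ===== PRECONDITION & SPEC =====
def Spec_pb_deinterleave (x : List Int) (out : List Int) : Prop := out = pb_deinterleave_alt x
instance (x : List Int) (out : List Int) : Decidable (Spec_pb_deinterleave x out) := by unfold Spec_pb_deinterleave; infer_instance

-- ===== CLAIM (what is proved, stated in full; the proofs are below) =====
def Claim_equal_pb_deinterleave : Prop := ∀ (x : List Int), Dom_pb_deinterleave x → Spec_pb_deinterleave x (pb_deinterleave x)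

-- ===== LEMMAS AND PROOFS =====

theorem pv_len_foldl_set (f : ℕ → ℕ) (g : ℕ → Int) (l : List ℕ) (r : List Int) :
    (l.foldl (fun r i => r.set (f i) (g i)) r).length = r.length := by
  induction l generalizing r with
  | nil => rfl
  | cons a t ih => simp [List.foldl, ih]

theorem pv_getElem?_foldl_set_ne (f : ℕ → ℕ) (g : ℕ → Int) (l : List ℕ) (r : List Int)
    (j : ℕ) (h : ∀ i ∈ l, f i ≠ j) :
    (l.foldl (fun r i => r.set (f i) (g i)) r)[j]? = r[j]? := by
  induction l generalizing r with
  | nil => rfl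
  | cons a t ih =>
    have ha : f a ≠ j := h a (by simp)
    rw [List.foldl_cons, ih _ (fun i hi => h i (by simp [hi])), List.getElem?_set_ne ha]

theorem pv_getElem?_foldl_set_hit (f : ℕ → ℕ) (g : ℕ → Int) (l : List ℕ) (r : List Int)
    (i j : ℕ) (hi : i ∈ l) (hf : f i = j)
    (huniq : ∀ i' ∈ l, f i' = j → i' = i) (hj : j < r.length) :
    (l.foldl (fun r i => r.set (f i) (g i)) r)[j]? = some (g i) := by
  induction l generalizing r with
  | nil => cases hi
  | cons a t ih =>
    rw [List.foldl_cons]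
    by_cases hit : i ∈ t
    · exact ih (r.set (f a) (g a)) hit
        (fun i' h' e => huniq i' (List.mem_cons_of_mem _ h') e) (by simpa using hj)
    · have hai : a = i := ((List.mem_cons.mp hi).resolve_right hit).symm
      subst hai
      have hnone : ∀ i' ∈ t, f i' ≠ j := by
        intro i' h' e
        exact hit (huniq i' (by simp [h']) e ▸ h')
      rw [pv_getElem?_foldl_set_ne _ _ _ _ _ hnone, hf,
        List.getElem?_set_self (by simpa [hf] using hj)]

theorem pv_interleave_length (a b : List Int) (h1 : b.length ≤ a.length) :
    (pvInterleave a b).length = a.length + b.length := by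
  induction a generalizing b with
  | nil =>
    cases b with
    | nil => rfl
    | cons b0 bs => simp at h1
  | cons a0 as ih =>
    cases b with
    | nil => simp [pvInterleave, ih]
    | cons b0 bs =>
      have := ih bs (by simpa using h1)
      simp [pvInterleave, this]; omega

theorem pv_interleave_getElem? (a b : List Int) (j : ℕ)
    (h1 : b.length ≤ a.length) (h2 : a.length ≤ b.length + 1) :
    (pvInterleave a b)[j]? = if j % 2 = 0 then a[j / 2]? else b[j / 2]? := by
  induction a generalizing b j with
  | nil =>
    have hb : b = [] := by
      cases b with
      | nil => rfl
      | cons b0 bs => simp at h1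
    subst hb
    simp [pvInterleave]
  | cons a0 as ih =>
    cases b with
    | nil =>
      have has : as = [] := by
        cases as with
        | nil => rfl
        | cons a1 as' => simp at h2
      subst has
      match j with
      | 0 => simp [pvInterleave]
      | j + 1 =>
        have e : pvInterleave [a0] ([] : List Int) = [a0] := rfl
        rw [e, List.getElem?_eq_none (by simp)]
        by_cases hm : (j + 1) % 2 = 0
        · rw [if_pos hm, List.getElem?_eq_none
            (by simp only [List.length_cons, List.length_nil]; omega)]
        · rw [if_neg hm]; simp
    | cons b0 bs =>
      match j with
      | 0 => simp [pvInterleave]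
      | 1 => simp [pvInterleave]
      | j + 2 =>
        have h1' : bs.length ≤ as.length := by simpa using h1
        have h2' : as.length ≤ bs.length + 1 := by simpa using h2
        have hm : (j + 2) % 2 = j % 2 := by omega
        have hd : (j + 2) / 2 = j / 2 + 1 := by omega
        simp only [pvInterleave, List.getElem?_cons_succ, hm, hd]
        exact ih bs j h1' h2'

theorem pv_deinterleave_eq (x : List Int) : pb_deinterleave x = pb_deinterleave_alt x := by
  set n := x.length with hn
  set half := (n + 1) / 2 with hhalf
  have hhn : half ≤ n := by omega
  have hlenA : (pb_deinterleave x).length = n := by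
    simp [pb_deinterleave, pv_len_foldl_set, ← hn, ← hhalf]
  have hlenB : (pb_deinterleave_alt x).length = n := by
    show (pvInterleave (x.take half) (x.drop half)).length = n
    rw [pv_interleave_length _ _ (by simp [← hn]; omega)]
    simp [← hn]; omega
  apply List.ext_getElem?
  intro j
  by_cases hj : j < n
  · -- in-range indices
    have hB : (pb_deinterleave_alt x)[j]? =
        if j % 2 = 0 then (x.take half)[j / 2]? else (x.drop half)[j / 2]? := by
      apply pv_interleave_getElem?
      · simp [← hn]; omega
      · simp [← hn]; omega
    by_cases hpar : j % 2 = 0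
    · -- even index: first fill loop hits, second does not touch it
      have hA : (pb_deinterleave x)[j]? = some (x.getD (j / 2) 0) := by
        show ((List.range (n - half)).foldl
            (fun r i => r.set (2 * i + 1) (x.getD (half + i) 0))
            ((List.range half).foldl (fun r i => r.set (2 * i) (x.getD i 0))
              (List.replicate n (0 : Int))))[j]? = _
        rw [pv_getElem?_foldl_set_ne _ _ _ _ _ (by intro i _; omega)]
        exact pv_getElem?_foldl_set_hit _ _ _ _ (j / 2) j
          (by simp [List.mem_range]; omega) (by omega)
          (fun i' _ e => by omega) (by simp; omega)
      rw [hA, hB, if_pos hpar, List.getElem?_take_of_lt (by omega),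
        List.getElem?_eq_getElem (by omega), List.getD_eq_getElem x 0 (by omega)]
    · -- odd index: second fill loop hits
      have hA : (pb_deinterleave x)[j]? = some (x.getD (half + j / 2) 0) := by
        show ((List.range (n - half)).foldl
            (fun r i => r.set (2 * i + 1) (x.getD (half + i) 0))
            ((List.range half).foldl (fun r i => r.set (2 * i) (x.getD i 0))
              (List.replicate n (0 : Int))))[j]? = _
        exact pv_getElem?_foldl_set_hit _ _ _ _ (j / 2) j
          (by simp [List.mem_range]; omega) (by omega)
          (fun i' _ e => by omega) (by simp [pv_len_foldl_set]; omega)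
      rw [hA, hB, if_neg hpar, List.getElem?_drop,
        List.getElem?_eq_getElem (by omega), List.getD_eq_getElem x 0 (by omega)]
  · rw [List.getElem?_eq_none (by omega), List.getElem?_eq_none (by omega)]

-- ===== VERDICT (by name: the statement is the Claim_ definition above) =====
theorem pb_deinterleave_spec : Claim_equal_pb_deinterleave := by
  intro x _
  exact pv_deinterleave_eq x
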